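-- pv_equiv track=rewrite | github.com/clusterhack/pyhwk | hwk/util/common.py | rstrfind_nth
-- ===== SOURCE A (Python) =====
-- def rstrfind_nth(str: str, sub: str, n: int = 1):
--   if n <= 0:
--     raise ValueError('n must be positive')
--   end = len(str)
--   for _ in range(n):
--     idx = str.rfind(sub, 0, end)
--     if idx < 0:
--       return -1
--     end = idx
--   return idx
-- ===== SOURCE B (Python) =====
-- def rstrfind_nth(str: str, sub: str, n: int = 1):
--   if n <= 0:
--     raise ValueError('n must be positive')
--   m = len(sub)
--   starts = [i for i in range(len(str) - m + 1) if str[i:i + m] == sub]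
--   j = len(starts) - 1
--   bound = len(str)
--   for _ in range(n):
--     while j >= 0 and starts[j] + m > bound:
--       j -= 1
--     if j < 0:
--       return -1
--     bound = starts[j]
--   return bound
-- ===== Notes on version B (the rewrite author's own statement) =====
-- stated objective: alternative
-- what changed: Instead of A's repeated rfind with a shrinking end bound, B precomputes the sorted list of all occurrence starts in one scan and then selects the nth non-overlapping occurrence from the right with a single backward pointer over that list.
import Mathlib
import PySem

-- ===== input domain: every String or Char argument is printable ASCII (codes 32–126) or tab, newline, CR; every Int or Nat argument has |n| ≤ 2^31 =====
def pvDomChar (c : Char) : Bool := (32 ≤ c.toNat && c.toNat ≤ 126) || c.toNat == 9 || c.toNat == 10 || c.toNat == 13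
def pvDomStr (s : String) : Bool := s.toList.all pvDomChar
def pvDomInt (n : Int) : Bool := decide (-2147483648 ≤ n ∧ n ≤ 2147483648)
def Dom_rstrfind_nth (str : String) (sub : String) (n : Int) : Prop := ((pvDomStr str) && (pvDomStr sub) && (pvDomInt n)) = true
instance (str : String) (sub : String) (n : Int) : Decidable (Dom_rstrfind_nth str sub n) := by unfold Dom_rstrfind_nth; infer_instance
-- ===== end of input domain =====

-- B replaces A's repeated rfind-with-shrinking-end-bound by precomputing the list of ALL
-- occurrence starts once and then walking a single backward pointer over that sorted list
-- (objective: alternative decomposition; same value everywhere A returns).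

-- ===== PORT A =====
-- the 'for _ in range(n)' loop of A, n ≥ 1: runs the body (1 + fuel) times, 'end' is the Int e
def rstrfindA_go (s : String) (sub : String) : Nat → Int → Int
  | 0, e =>
    let idx := PySem.Str.rfindFrom s sub 0 (some e)   -- str.rfind(sub, 0, end)
    if idx < 0 then -1 else idx
  | k+1, e =>
    let idx := PySem.Str.rfindFrom s sub 0 (some e)
    if idx < 0 then -1 else rstrfindA_go s sub k idx

def rstrfind_nth (str : String) (sub : String) (n : Int) : Int :=
  if n ≤ 0 then 0   -- Python raises ValueError here; excluded by Pre_rstrfind_nth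
  else rstrfindA_go str sub (n.toNat - 1) (PySem.Str.len str)

-- ===== PORT B =====
-- starts = [i for i in range(len(str) - m + 1) if str[i:i+m] == sub]
def rstrfindB_starts (str : String) (sub : String) : List Int :=
  (PySem.List.pyRange 0 (PySem.Str.len str - PySem.Str.len sub + 1) 1).filter
    (fun i => PySem.Str.slice str (some i) (some (i + PySem.Str.len sub)) == sub)

-- while j >= 0 and starts[j] + m > bound: j -= 1   (j stays within range, so getD is exact)
def rstrfindB_skip (starts : List Int) (m : Int) (bound : Int) (j : Int) : Int :=
  if j < 0 then j
  else if bound < PySem.List.pyGetD starts j 0 + m then rstrfindB_skip starts m bound (j - 1)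
  else j
termination_by (j + 1).toNat
decreasing_by omega

-- the 'for _ in range(n)' loop of B, n ≥ 1: state is (bound, j)
def rstrfindB_loop (starts : List Int) (m : Int) : Nat → Int → Int → Int
  | 0, bound, j =>
    let j' := rstrfindB_skip starts m bound j
    if j' < 0 then -1 else PySem.List.pyGetD starts j' 0
  | k+1, bound, j =>
    let j' := rstrfindB_skip starts m bound j
    if j' < 0 then -1 else rstrfindB_loop starts m k (PySem.List.pyGetD starts j' 0) j'

def rstrfind_nth_alt (str : String) (sub : String) (n : Int) : Int :=
  if n ≤ 0 then 0   -- Python raises ValueError here; excluded by Pre_rstrfind_nth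
  else
    let starts := rstrfindB_starts str sub
    rstrfindB_loop starts (PySem.Str.len sub) (n.toNat - 1) (PySem.Str.len str)
      ((starts.length : Int) - 1)

-- ===== PRECONDITION & SPEC =====
-- Pre_ excludes exactly n ≤ 0, where the Python A raises ValueError('n must be positive')
def Pre_rstrfind_nth (str : String) (sub : String) (n : Int) : Prop := 1 ≤ n
instance (str : String) (sub : String) (n : Int) : Decidable (Pre_rstrfind_nth str sub n) := by unfold Pre_rstrfind_nth; infer_instance

def pvWitness_rstrfind_nth : String × String × Int := ("abcabcab", "ab", 2)

def Spec_rstrfind_nth (str : String) (sub : String) (n : Int) (out : Int) : Prop := out = rstrfind_nth_alt str sub n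
instance (str : String) (sub : String) (n : Int) (out : Int) : Decidable (Spec_rstrfind_nth str sub n out) := by unfold Spec_rstrfind_nth; infer_instance

-- ===== CLAIM =====
def Claim_equal_rstrfind_nth : Prop := ∀ (str : String) (sub : String) (n : Int), Dom_rstrfind_nth str sub n → Pre_rstrfind_nth str sub n → Spec_rstrfind_nth str sub n (rstrfind_nth str sub n)

-- ===== LEMMAS AND PROOFS =====

-- the one-step contract both loop bodies satisfy: r is the greatest occurrence start i of
-- sub in s with i + |sub| ≤ bound, or -1 if there is none
def PvStep (s t : List Char) (bound : Int) (r : Int) : Prop :=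
  (r = -1 ∧ ∀ i : Nat, t <+: s.drop i → ¬ ((i : Int) + t.length ≤ bound)) ∨
  (∃ i : Nat, r = (i : Int) ∧ t <+: s.drop i ∧ (i : Int) + t.length ≤ bound ∧
    ∀ i' : Nat, i < i' → t <+: s.drop i' → ¬ ((i' : Int) + t.length ≤ bound))

theorem pvStep_unique {s t : List Char} {bound r1 r2 : Int}
    (h1 : PvStep s t bound r1) (h2 : PvStep s t bound r2) : r1 = r2 := by
  rcases h1 with ⟨e1, h1⟩ | ⟨i, e1, o1, b1, m1⟩
  · rcases h2 with ⟨e2, _⟩ | ⟨i2, e2, o2, b2, _⟩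
    · rw [e1, e2]
    · exact absurd b2 (h1 i2 o2)
  · rcases h2 with ⟨e2, h2⟩ | ⟨i2, e2, o2, b2, m2⟩
    · exact absurd b1 (h2 i o1)
    · rcases Nat.lt_trichotomy i i2 with h | h | h
      · exact absurd b2 (m1 i2 h o2)
      · rw [e1, e2, h]
      · exact absurd b1 (m2 i h o1)

-- rfind.go s sub j is the greatest occurrence start ≤ j, or -1
theorem pv_rfind_go_spec (s sub : List Char) (j : Nat) :
    (PySem.Chars.rfind.go s sub j = -1 ∧ ∀ i ≤ j, ¬ sub <+: s.drop i) ∨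
    (∃ i : Nat, PySem.Chars.rfind.go s sub j = (i : Int) ∧ i ≤ j ∧ sub <+: s.drop i ∧
      ∀ i', i < i' → i' ≤ j → ¬ sub <+: s.drop i') := by
  induction j with
  | zero =>
    have e : PySem.Chars.rfind.go s sub 0 = if sub.isPrefixOf s then 0 else -1 := rfl
    by_cases h : sub <+: s
    · right
      exact ⟨0, by simp [e, List.isPrefixOf_iff_prefix, h], Nat.le_refl 0, by simpa using h,
        by omega⟩
    · left
      refine ⟨by simp [e, List.isPrefixOf_iff_prefix, h], ?_⟩
      intro i hi
      interval_cases i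
      simpa using h
  | succ j ih =>
    have e : PySem.Chars.rfind.go s sub (j+1) =
        if sub.isPrefixOf (s.drop (j+1)) then ((j+1 : Nat) : Int)
        else PySem.Chars.rfind.go s sub j := rfl
    by_cases h : sub <+: s.drop (j+1)
    · right
      refine ⟨j+1, by simp [e, List.isPrefixOf_iff_prefix, h], Nat.le_refl _, h, by omega⟩
    · rcases ih with ⟨h1, h2⟩ | ⟨i, h1, h2, h3, h4⟩
      · left
        refine ⟨by simp [e, List.isPrefixOf_iff_prefix, h, h1], ?_⟩
        intro i hi
        rcases Nat.lt_or_ge i (j+1) with hlt | hge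
        · exact h2 i (by omega)
        · have : i = j + 1 := by omega
          subst this; exact h
      · right
        refine ⟨i, by simp [e, List.isPrefixOf_iff_prefix, h, h1], by omega, h3, ?_⟩
        intro i' hi1 hi2
        rcases Nat.lt_or_ge i' (j+1) with hlt | hge
        · exact h4 i' hi1 (by omega)
        · have : i' = j + 1 := by omega
          subst this; exact h

-- rfind with start 0 and a valid end bound is rfind on the prefix
theorem pv_rfindFrom_take (s sub : List Char) (e : Nat) (he : e ≤ s.length) :
    PySem.Chars.rfindFrom s sub 0 (some (e : Int)) = PySem.Chars.rfind (s.take e) sub := by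
  simp only [PySem.Chars.rfindFrom]
  have h1 : ¬ ((s.length : Int) < (e : Int)) := by exact_mod_cast not_lt.mpr he
  have h2 : ¬ ((e : Int) < 0) := by omega
  simp only [h1, h2, if_false, lt_self_iff_false, Int.toNat_natCast, zero_add]
  split <;> simp_all

-- occurrence within s.take e ↔ occurrence within s that fits under the bound e
theorem pv_prefix_drop_take (s t : List Char) (e i : Nat) (hi : i ≤ e) :
    t <+: (s.take e).drop i ↔ (t <+: s.drop i ∧ i + t.length ≤ e) := by
  rw [List.drop_take, List.prefix_take_iff]
  constructor
  · rintro ⟨h1, h2⟩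
    exact ⟨h1, by omega⟩
  · rintro ⟨h1, h2⟩
    exact ⟨h1, by omega⟩

-- A's loop body satisfies PvStep
theorem pv_A_step (str sub : String) (e : Nat) (he : e ≤ str.toList.length) :
    PvStep str.toList sub.toList (e : Int) (PySem.Str.rfindFrom str sub 0 (some (e : Int))) := by
  rw [PySem.Str.rfindFrom_eq, pv_rfindFrom_take str.toList sub.toList e he]
  have hgo : PySem.Chars.rfind (str.toList.take e) sub.toList =
      PySem.Chars.rfind.go (str.toList.take e) sub.toList (str.toList.take e).length := rfl
  have hlt : (str.toList.take e).length = e := by rw [List.length_take]; omega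
  rcases pv_rfind_go_spec (str.toList.take e) sub.toList (str.toList.take e).length with
    ⟨h1, h2⟩ | ⟨i, h1, h2, h3, h4⟩
  · left
    refine ⟨by rw [hgo, h1], ?_⟩
    intro i hocc hle
    have hie : i ≤ e := by omega
    exact h2 i (by omega) ((pv_prefix_drop_take _ _ e i hie).mpr ⟨hocc, by omega⟩)
  · right
    have hie : i ≤ e := by omega
    obtain ⟨ho, hb⟩ := (pv_prefix_drop_take str.toList sub.toList e i hie).mp h3
    refine ⟨i, by rw [hgo, h1], ho, by omega, ?_⟩
    intro i' hii hocc hle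
    have hie' : i' ≤ e := by omega
    exact h4 i' hii (by omega) ((pv_prefix_drop_take _ _ e i' hie').mpr ⟨hocc, by omega⟩)

-- membership in B's precomputed occurrence list
theorem pv_mem_starts (str sub : String) (x : Int) :
    x ∈ rstrfindB_starts str sub ↔ ∃ i : Nat, x = (i : Int) ∧ sub.toList <+: str.toList.drop i ∧
      i + sub.toList.length ≤ str.toList.length := by
  have hL : PySem.Str.len str = (str.toList.length : Int) := by simp [PySem.Str.len_eq]
  have hM : PySem.Str.len sub = (sub.toList.length : Int) := by simp [PySem.Str.len_eq]
  unfold rstrfindB_starts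
  rw [List.mem_filter, PySem.List.mem_pyRange_one]
  constructor
  · rintro ⟨⟨hx0, hxb⟩, heq⟩
    rw [hL, hM] at hxb
    refine ⟨x.toNat, (Int.toNat_of_nonneg hx0).symm, ?_, by omega⟩
    have hsl : (PySem.Str.slice str (some x) (some (x + PySem.Str.len sub))).toList =
        (str.toList.drop x.toNat).take sub.toList.length := by
      rw [PySem.Str.toList_slice]
      have hx : x = ((x.toNat : Nat) : Int) := (Int.toNat_of_nonneg hx0).symm
      rw [hx]
      simp only [PySem.Str.len_eq, PySem.Chars.slice_eq_listSlice]
      exact_mod_cast PySem.List.slice_natCast_add str.toList x.toNat sub.toList.length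
    have heq' : (PySem.Str.slice str (some x) (some (x + PySem.Str.len sub))) = sub :=
      eq_of_beq heq
    have : (str.toList.drop x.toNat).take sub.toList.length = sub.toList := by
      rw [← hsl, heq']
    rw [List.prefix_iff_eq_take]
    exact this.symm
  · rintro ⟨i, rfl, hocc, hfit⟩
    refine ⟨⟨by exact_mod_cast Int.natCast_nonneg i, by rw [hL, hM]; omega⟩, ?_⟩
    have hsl : (PySem.Str.slice str (some (i : Int)) (some ((i : Int) + PySem.Str.len sub))).toList =
        (str.toList.drop i).take sub.toList.length := by
      rw [PySem.Str.toList_slice]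
      simp only [PySem.Str.len_eq, PySem.Chars.slice_eq_listSlice]
      exact_mod_cast PySem.List.slice_natCast_add str.toList i sub.toList.length
    have ht : (str.toList.drop i).take sub.toList.length = sub.toList :=
      ((List.prefix_iff_eq_take.mp hocc)).symm
    refine beq_iff_eq.mpr ?_
    have := hsl.trans ht
    exact String.toList_injective (by rw [this])

-- B's starts list is strictly increasing
theorem pv_starts_sorted (str sub : String) :
    (rstrfindB_starts str sub).Pairwise (· < ·) :=
  (PySem.List.pairwise_lt_pyRange_one _ _).filter _

-- the while loop: from pointer j1-1, under the promise that every index ≥ j1 fails the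
-- bound test, it lands on the greatest index whose entry fits under bound, or on -1
theorem pv_skip_spec (S : List Int) (m bound : Int) (j1 : Nat) (hj : j1 ≤ S.length)
    (Htail : ∀ k : Nat, j1 ≤ k → k < S.length → bound < S.getD k 0 + m) :
    (rstrfindB_skip S m bound ((j1 : Int) - 1) = -1 ∧
      ∀ k : Nat, k < S.length → bound < S.getD k 0 + m) ∨
    (∃ jn : Nat, rstrfindB_skip S m bound ((j1 : Int) - 1) = (jn : Int) ∧ jn < j1 ∧
      S.getD jn 0 + m ≤ bound ∧ ∀ k : Nat, jn < k → k < S.length → bound < S.getD k 0 + m) := by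
  induction j1 with
  | zero =>
    left
    constructor
    · rw [rstrfindB_skip]
      norm_num
    · intro k hk
      exact Htail k (Nat.zero_le k) hk
  | succ j ih =>
    rw [rstrfindB_skip]
    have h0 : ¬ (((j + 1 : Nat) : Int) - 1 < 0) := by push_cast; omega
    rw [if_neg h0]
    have hgd : PySem.List.pyGetD S (((j + 1 : Nat) : Int) - 1) 0 = S.getD j 0 := by
      have : ((j + 1 : Nat) : Int) - 1 = ((j : Nat) : Int) := by push_cast; omega
      rw [this, PySem.List.pyGetD_natCast]
    rw [hgd]
    by_cases hc : bound < S.getD j 0 + m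
    · rw [if_pos hc]
      have harg : ((j + 1 : Nat) : Int) - 1 - 1 = ((j : Nat) : Int) - 1 := by push_cast; omega
      rw [harg]
      have Htail2 : ∀ k : Nat, j ≤ k → k < S.length → bound < S.getD k 0 + m := by
        intro k hk1 hk2
        rcases Nat.eq_or_lt_of_le hk1 with rfl | hlt
        · exact hc
        · exact Htail k (by omega) hk2
      rcases ih (by omega) Htail2 with h | ⟨jn, h1, h2, h3, h4⟩
      · exact Or.inl h
      · exact Or.inr ⟨jn, h1, by omega, h3, h4⟩
    · rw [if_neg hc]
      right
      exact ⟨j, by push_cast; omega, by omega, by omega, fun k hk1 hk2 => Htail k (by omega) hk2⟩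

-- sorted + membership: entries are occurrence starts, and index order is value order
theorem pv_getD_mem (S : List Int) (k : Nat) (hk : k < S.length) : S.getD k 0 ∈ S := by
  rw [List.getD_eq_getElem?_getD, List.getElem?_eq_getElem hk]
  exact List.getElem_mem hk

theorem pv_sorted_getD_lt (S : List Int) (hs : S.Pairwise (· < ·)) (a b : Nat)
    (hab : a < b) (hb : b < S.length) : S.getD a 0 < S.getD b 0 := by
  have := List.pairwise_iff_getElem.mp hs a b (by omega) hb hab
  rwa [List.getD_eq_getElem?_getD, List.getElem?_eq_getElem (by omega : a < S.length),
    List.getD_eq_getElem?_getD, List.getElem?_eq_getElem hb]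

-- B's loop body (skip + read) satisfies PvStep, under the pointer invariant
theorem pv_B_step (str sub : String) (bound : Int) (j1 : Nat)
    (hbL : bound ≤ (str.toList.length : Int))
    (hj : j1 ≤ (rstrfindB_starts str sub).length)
    (Htail : ∀ k : Nat, j1 ≤ k → k < (rstrfindB_starts str sub).length →
      bound < (rstrfindB_starts str sub).getD k 0 + sub.toList.length) :
    (rstrfindB_skip (rstrfindB_starts str sub) (PySem.Str.len sub) bound ((j1 : Int) - 1) = -1 ∧
      PvStep str.toList sub.toList bound (-1)) ∨
    (∃ jn : Nat, rstrfindB_skip (rstrfindB_starts str sub) (PySem.Str.len sub) bound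
        ((j1 : Int) - 1) = (jn : Int) ∧ jn < j1 ∧
      PvStep str.toList sub.toList bound ((rstrfindB_starts str sub).getD jn 0) ∧
      (∀ k : Nat, jn + 1 ≤ k → k < (rstrfindB_starts str sub).length →
        (rstrfindB_starts str sub).getD jn 0 < (rstrfindB_starts str sub).getD k 0 +
          sub.toList.length)) := by
  set S := rstrfindB_starts str sub with hS
  have hm : PySem.Str.len sub = (sub.toList.length : Int) := by
    simp [PySem.Str.len_eq]
  rw [hm]
  rcases pv_skip_spec S (sub.toList.length : Int) bound j1 hj Htail with ⟨he, hall⟩ |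
    ⟨jn, he, hlt, hfit, htail⟩
  · left
    refine ⟨he, Or.inl ⟨rfl, ?_⟩⟩
    intro i hocc hle
    have hfit : i + sub.toList.length ≤ str.toList.length := by omega
    have hmem : ((i : Int)) ∈ S := (pv_mem_starts str sub (i : Int)).mpr ⟨i, rfl, hocc, hfit⟩
    obtain ⟨k, hk, hval⟩ := List.getElem_of_mem hmem
    have : bound < S.getD k 0 + sub.toList.length := hall k hk
    rw [List.getD_eq_getElem?_getD, List.getElem?_eq_getElem hk] at this
    simp only [Option.getD_some, hval] at this
    omega
  · right
    have hjn : jn < S.length := by omega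
    have hmemv : S.getD jn 0 ∈ S := pv_getD_mem S jn hjn
    obtain ⟨i, hvi, hocc, hfiti⟩ := (pv_mem_starts str sub _).mp hmemv
    refine ⟨jn, he, hlt, Or.inr ⟨i, hvi, hocc, by omega, ?_⟩, ?_⟩
    · intro i' hii hocc' hle
      have hfit' : i' + sub.toList.length ≤ str.toList.length := by omega
      have hmem' : ((i' : Int)) ∈ S := (pv_mem_starts str sub _).mpr ⟨i', rfl, hocc', hfit'⟩
      obtain ⟨k, hk, hval⟩ := List.getElem_of_mem hmem'
      have hkd : S.getD k 0 = (i' : Int) := by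
        rw [List.getD_eq_getElem?_getD, List.getElem?_eq_getElem hk]
        simp [hval]
      have hkgt : jn < k := by
        by_contra hle2
        push_neg at hle2
        rcases Nat.eq_or_lt_of_le hle2 with rfl | hlt2
        · rw [hkd] at hvi
          have : i' = i := by exact_mod_cast hvi
          omega
        · have := pv_sorted_getD_lt S (pv_starts_sorted str sub) k jn hlt2 hjn
          rw [hkd, hvi] at this
          have : i' < i := by exact_mod_cast this
          omega
      have := htail k hkgt hk
      rw [hkd] at this
      omega
    · intro k hk1 hk2
      have h1 := pv_sorted_getD_lt S (pv_starts_sorted str sub) jn k (by omega) hk2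
      omega

-- the loops agree, under the pointer invariant linking A's end bound to B's (bound, j)
theorem pv_loop_eq (str sub : String) (fuel : Nat) (bound : Int) (j1 : Nat)
    (hj : j1 ≤ (rstrfindB_starts str sub).length)
    (Htail : ∀ k : Nat, j1 ≤ k → k < (rstrfindB_starts str sub).length →
      bound < (rstrfindB_starts str sub).getD k 0 + sub.toList.length)
    (hb : ∃ e : Nat, bound = (e : Int) ∧ e ≤ str.toList.length) :
    rstrfindA_go str sub fuel bound =
      rstrfindB_loop (rstrfindB_starts str sub) (PySem.Str.len sub) fuel bound
        ((j1 : Int) - 1) := by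
  induction fuel generalizing bound j1 with
  | zero =>
    obtain ⟨e, rfl, he⟩ := hb
    simp only [rstrfindA_go, rstrfindB_loop]
    have hA := pv_A_step str sub e he
    rcases pv_B_step str sub (e : Int) j1 (by exact_mod_cast he) hj Htail with
      ⟨hes, hstep⟩ | ⟨jn, hes, hjn, hstep, _⟩
    · rw [hes, pvStep_unique hA hstep]
      norm_num
    · rw [hes]
      have h0 : ¬ (((jn : Nat) : Int) < 0) := by omega
      rw [if_neg h0, PySem.List.pyGetD_natCast]
      have hjnl : jn < (rstrfindB_starts str sub).length := by omega
      obtain ⟨i, hvi, hocc, hfit⟩ := (pv_mem_starts str sub _).mp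
        (pv_getD_mem (rstrfindB_starts str sub) jn hjnl)
      have hval := pvStep_unique hA hstep
      rw [hvi] at hval
      rw [hval, if_neg (by omega : ¬ ((i : Nat) : Int) < 0)]
      exact hvi.symm
  | succ k ih =>
    obtain ⟨e, rfl, he⟩ := hb
    simp only [rstrfindA_go, rstrfindB_loop]
    have hA := pv_A_step str sub e he
    rcases pv_B_step str sub (e : Int) j1 (by exact_mod_cast he) hj Htail with
      ⟨hes, hstep⟩ | ⟨jn, hes, hjn, hstep, htail⟩
    · rw [hes, pvStep_unique hA hstep]
      norm_num
    · rw [hes]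
      have h0 : ¬ (((jn : Nat) : Int) < 0) := by omega
      rw [if_neg h0, PySem.List.pyGetD_natCast]
      have hjnl : jn < (rstrfindB_starts str sub).length := by omega
      obtain ⟨i, hvi, hocc, hfit⟩ := (pv_mem_starts str sub _).mp
        (pv_getD_mem (rstrfindB_starts str sub) jn hjnl)
      have hval := pvStep_unique hA hstep
      rw [hvi] at hval
      rw [hval, if_neg (by omega : ¬ ((i : Nat) : Int) < 0), hvi]
      have hiL : i ≤ str.toList.length := by omega
      have hrec := ih ((i : Nat) : Int) (jn + 1) (by omega)
        (by intro kk hk1 hk2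
            rw [← hvi]
            exact htail kk hk1 hk2)
        ⟨i, rfl, hiL⟩
      have hj2 : ((jn + 1 : Nat) : Int) - 1 = ((jn : Nat) : Int) := by push_cast; ring
      rw [hj2] at hrec
      exact hrec

-- ===== VERDICT =====
theorem rstrfind_nth_spec : Claim_equal_rstrfind_nth := by
  intro str sub n _ hpre
  unfold Spec_rstrfind_nth rstrfind_nth rstrfind_nth_alt
  have hn : ¬ n ≤ 0 := by unfold Pre_rstrfind_nth at hpre; omega
  rw [if_neg hn, if_neg hn]
  have h := pv_loop_eq str sub (n.toNat - 1) (PySem.Str.len str)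
    (rstrfindB_starts str sub).length (Nat.le_refl _)
    (by intro k hk1 hk2; omega)
    ⟨str.toList.length, by simp [PySem.Str.len_eq], Nat.le_refl _⟩
  exact h
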